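-- pv_equiv track=rewrite | github.com/d0ggzi/EnergyGameSite | new_game.py | schet
-- ===== SOURCE A (Python) =====
-- lines = [
--     [{'name': 'Больница', 'potreb': 10, 'next_potreb': 15},
--      {'name': 'Завод', 'potreb': 15, 'next_potreb': 20}],
--     [{'name': 'Завод', 'potreb': 5, 'next_potreb': 13},
--      {'name': 'Жилой дом', 'potreb': 8, 'next_potreb': 18},
--      {'name': 'Жилой дом', 'potreb': 15, 'next_potreb': 23}],
--     [{'name': 'Жилой дом', 'potreb': 2, 'next_potreb': 2},
--      {'name': 'Жилой дом', 'potreb': 3, 'next_potreb': 3}]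
-- ]
--
-- def schet(score, data):
--     for i in range(len(lines)):
--         for house in lines[i]:
--             if house['name'] == 'Больница':
--                 if data[i] == 0:
--                     score -= 100
--                 else:
--                     score += 15
--             elif house['name'] == 'Завод':
--                 if data[i] == 0:
--                     score -= 50
--                 else:
--                     score += 25
--             else:
--                 if data[i] == 0:
--                     score -= 15
--                 else:
--                     score += 10
--
--     return score
-- ===== SOURCE B (Python) =====
-- # Precomputed per-line totals derived from the fixed `lines` table:
-- # sum of each line's penalties when data[i]==0, and of rewards otherwise.
-- ZERO = [-150, -80, -30]
-- NONZERO = [40, 45, 20]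
--
-- def schet(score, data):
--     for i in range(len(ZERO)):
--         score += ZERO[i] if data[i] == 0 else NONZERO[i]
--     return score
-- ===== Notes on version B (the rewrite author's own statement) =====
-- stated objective: simpler
-- what changed: Collapses the nested per-house loop with name-based if/elif dispatch into one flat pass over data using precomputed per-line totals (ZERO/NONZERO).
import Mathlib
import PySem

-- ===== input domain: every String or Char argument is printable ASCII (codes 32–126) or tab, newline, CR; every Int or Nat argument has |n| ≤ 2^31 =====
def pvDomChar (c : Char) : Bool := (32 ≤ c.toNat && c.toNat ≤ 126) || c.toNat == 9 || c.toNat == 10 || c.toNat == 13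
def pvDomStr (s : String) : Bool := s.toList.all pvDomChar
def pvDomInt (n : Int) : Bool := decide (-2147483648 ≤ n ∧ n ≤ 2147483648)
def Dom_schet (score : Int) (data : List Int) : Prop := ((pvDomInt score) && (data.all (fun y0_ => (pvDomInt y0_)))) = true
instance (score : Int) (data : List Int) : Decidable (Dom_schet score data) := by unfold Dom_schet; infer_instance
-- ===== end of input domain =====

-- B replaces A's nested per-house loop and name dispatch with one flat pass over
-- precomputed per-line totals (objective: simpler).


-- ===== PORT A =====
-- the fixed module-level `lines` table; only the names drive the branches, but the
-- unused 'potreb'/'next_potreb' fields are kept as the rest of each triple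
def pyLines : List (List (String × Int × Int)) :=
  [[("Больница", 10, 15), ("Завод", 15, 20)],
   [("Завод", 5, 13), ("Жилой дом", 8, 18), ("Жилой дом", 15, 23)],
   [("Жилой дом", 2, 2), ("Жилой дом", 3, 3)]]

def schet (score : Int) (data : List Int) : Int :=
  (PySem.List.pyRange 0 (Int.ofNat pyLines.length) 1).foldl (fun s i =>
    ((PySem.List.pyGet? pyLines i).getD []).foldl (fun s house =>
      if house.1 == "Больница" then
        (if (PySem.List.pyGet? data i).getD 0 == 0 then s - 100 else s + 15)
      else if house.1 == "Завод" then
        (if (PySem.List.pyGet? data i).getD 0 == 0 then s - 50 else s + 25)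
      else
        (if (PySem.List.pyGet? data i).getD 0 == 0 then s - 15 else s + 10)) s) score

-- ===== PORT B =====
def zeroTotals : List Int := [-150, -80, -30]
def nonzeroTotals : List Int := [40, 45, 20]

def schet_alt (score : Int) (data : List Int) : Int :=
  (PySem.List.pyRange 0 (Int.ofNat zeroTotals.length) 1).foldl (fun s i =>
    s + (if (PySem.List.pyGet? data i).getD 0 == 0
         then (PySem.List.pyGet? zeroTotals i).getD 0
         else (PySem.List.pyGet? nonzeroTotals i).getD 0)) score

-- ===== PRECONDITION & SPEC =====
-- both Pythons raise IndexError on data[i] for i < 3 when data is shorter; excluded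
def Pre_schet (score : Int) (data : List Int) : Prop := 3 ≤ data.length
instance (score : Int) (data : List Int) : Decidable (Pre_schet score data) := by unfold Pre_schet; infer_instance
def pvWitness_schet : Int × List Int := (0, [0, 1, 2])
def Spec_schet (score : Int) (data : List Int) (out : Int) : Prop := out = schet_alt score data
instance (score : Int) (data : List Int) (out : Int) : Decidable (Spec_schet score data out) := by unfold Spec_schet; infer_instance

-- ===== CLAIM (what is proved, stated in full; the proofs are below) =====
def Claim_equal_schet : Prop := ∀ (score : Int) (data : List Int), Dom_schet score data → Pre_schet score data → Spec_schet score data (schet score data)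

-- ===== LEMMAS AND PROOFS =====

-- ===== VERDICT (by name: the statement is the Claim_ definition above) =====
theorem schet_spec : Claim_equal_schet := by
  intro score data _ hpre
  unfold Pre_schet at hpre
  obtain ⟨a, b, c, rest, rfl⟩ : ∃ a b c rest, data = a :: b :: c :: rest := by
    match data, hpre with
    | a :: b :: c :: rest, _ => exact ⟨a, b, c, rest, rfl⟩
  unfold Spec_schet schet schet_alt
  simp [pyLines, zeroTotals, nonzeroTotals, PySem.List.pyRange, PySem.List.pyGet?,
        PySem.List.pyIdx?, List.range_succ]
  split_ifs <;> omega
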